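-- pv_equiv track=rewrite | github.com/ucbdrive/bdd100k | bdd_mtl/mmdet/core/track/find_video_tubes.py | track_gather
-- ===== SOURCE A (Python) =====
-- from collections import defaultdict
--
-- def track_gather(outputs, img_ids):
--     num_frames = len(img_ids)
--     output_list = []
--     for k in range(num_frames):
--         out = defaultdict(list)
--         for res in outputs:
--             if k in res.keys():
--                 out.update(res[k])
--         output_list.append(out)
--     return output_list
-- ===== SOURCE B (Python) =====
-- def track_gather(outputs, img_ids):
--     # Single pass: preallocate one dict per frame, scatter every per-frame
--     # dict of each output once, in output order.
--     frames = [{} for _ in range(len(img_ids))]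
--     for res in outputs:
--         for k, d in res.items():
--             if 0 <= k < len(frames):
--                 frames[k].update(d)
--     return frames
-- ===== Notes on version B (the rewrite author's own statement) =====
-- stated objective: faster
-- what changed: Instead of scanning the whole outputs list once per frame index (gather), B preallocates one dict per frame and scatters each output's per-frame entries once in a single pass over outputs.
import Mathlib
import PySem

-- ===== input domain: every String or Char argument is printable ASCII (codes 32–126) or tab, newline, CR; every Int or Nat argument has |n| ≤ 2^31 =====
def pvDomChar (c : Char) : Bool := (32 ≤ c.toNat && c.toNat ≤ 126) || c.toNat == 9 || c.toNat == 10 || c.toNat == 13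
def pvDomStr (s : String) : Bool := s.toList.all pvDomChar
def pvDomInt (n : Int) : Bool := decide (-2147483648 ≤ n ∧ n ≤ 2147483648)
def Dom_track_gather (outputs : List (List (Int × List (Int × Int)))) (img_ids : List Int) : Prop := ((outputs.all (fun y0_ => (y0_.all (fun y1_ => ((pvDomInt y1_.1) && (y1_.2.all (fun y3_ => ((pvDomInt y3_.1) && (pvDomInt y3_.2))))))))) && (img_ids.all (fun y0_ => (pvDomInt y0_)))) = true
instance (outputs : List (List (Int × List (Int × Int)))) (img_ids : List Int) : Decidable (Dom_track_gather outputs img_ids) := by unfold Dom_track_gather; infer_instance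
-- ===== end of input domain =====

-- B scatters each output's per-frame entries once into preallocated frame dicts (one pass over
-- outputs) instead of A's scan of the whole outputs list for every frame index.

-- ===== PORT A =====
-- out.update(d): fold dict-insert over the pairs of d (Python dict update semantics)
def pvDictUpdate (out : PySem.Dict Int Int) (d : List (Int × Int)) : PySem.Dict Int Int :=
  d.foldl (fun o p => o.insert p.1 p.2) out

def track_gather (outputs : List (List (Int × List (Int × Int)))) (img_ids : List Int) : List (List (Int × Int)) :=
  (PySem.List.pyRange 0 (img_ids.length : Int) 1).foldl
    (fun output_list k =>
      output_list ++
        [(outputs.foldl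
            (fun out res =>
              match List.lookup k res with   -- 'if k in res.keys(): out.update(res[k])'
              | some d => pvDictUpdate out d
              | none => out)
            PySem.Dict.empty).items])
    []

-- ===== PORT B =====
def track_gather_alt (outputs : List (List (Int × List (Int × Int)))) (img_ids : List Int) : List (List (Int × Int)) :=
  (outputs.foldl
    (fun frames res =>
      res.foldl
        (fun frames kd =>
          if 0 ≤ kd.1 ∧ kd.1 < (img_ids.length : Int) then
            frames.set kd.1.toNat (pvDictUpdate (frames.getD kd.1.toNat PySem.Dict.empty) kd.2)
          else frames)
        frames)
    (List.replicate img_ids.length (PySem.Dict.empty : PySem.Dict Int Int))).map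
    (fun d => d.items)

-- ===== PRECONDITION & SPEC =====
-- Pre_ excludes inputs where some per-output association list has duplicate frame keys: such a
-- value is not representable as a Python dict (A's parameter is a dict), so first-vs-last-match
-- behaviour there is accidental.
def Pre_track_gather (outputs : List (List (Int × List (Int × Int)))) (img_ids : List Int) : Prop :=
  ∀ res ∈ outputs, (res.map Prod.fst).Nodup
instance (outputs : List (List (Int × List (Int × Int)))) (img_ids : List Int) : Decidable (Pre_track_gather outputs img_ids) := by unfold Pre_track_gather; infer_instance

def pvWitness_track_gather : (List (List (Int × List (Int × Int)))) × List Int :=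
  ([[(0, [(1, 2)]), (1, [(3, 4)])], [(1, [(3, 9), (5, 6)])]], [10, 11])

def Spec_track_gather (outputs : List (List (Int × List (Int × Int)))) (img_ids : List Int) (out : List (List (Int × Int))) : Prop := out = track_gather_alt outputs img_ids
instance (outputs : List (List (Int × List (Int × Int)))) (img_ids : List Int) (out : List (List (Int × Int))) : Decidable (Spec_track_gather outputs img_ids out) := by unfold Spec_track_gather; infer_instance

-- ===== CLAIM (what is proved, stated in full; the proofs are below) =====
def Claim_equal_track_gather : Prop := ∀ (outputs : List (List (Int × List (Int × Int)))) (img_ids : List Int), Dom_track_gather outputs img_ids → Pre_track_gather outputs img_ids → Spec_track_gather outputs img_ids (track_gather outputs img_ids)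

-- ===== LEMMAS AND PROOFS =====

-- A's per-frame gathered dict
def pvGather (outputs : List (List (Int × List (Int × Int)))) (k : Int) : PySem.Dict Int Int :=
  outputs.foldl
    (fun out res =>
      match List.lookup k res with
      | some d => pvDictUpdate out d
      | none => out)
    PySem.Dict.empty

-- setting one slot of a map-over-range is again a map-over-range
lemma pv_set_map_range {β : Type} (g : Nat → β) (n j : Nat) (v : β) :
    ((List.range n).map g).set j v
      = (List.range n).map (fun i => if i = j then v else g i) := by
  apply List.ext_getElem
  · simp
  · intro i h1 h2
    simp only [List.getElem_set, List.getElem_map, List.getElem_range]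
    split_ifs with ha hb <;> first | rfl | omega

-- scattering ONE output (with distinct frame keys) into frames given as a map over range
lemma pv_scatter_one (res : List (Int × List (Int × Int))) (hnd : (res.map Prod.fst).Nodup)
    (n : Nat) (g : Nat → PySem.Dict Int Int) :
    res.foldl
      (fun frames kd =>
        if 0 ≤ kd.1 ∧ kd.1 < (n : Int) then
          frames.set kd.1.toNat (pvDictUpdate (frames.getD kd.1.toNat PySem.Dict.empty) kd.2)
        else frames)
      ((List.range n).map g)
    = (List.range n).map (fun (i : Nat) =>
        match List.lookup ((i : Nat) : Int) res with
        | some d => pvDictUpdate (g i) d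
        | none => g i) := by
  induction res generalizing g with
  | nil => simp
  | cons kd rest ih =>
    obtain ⟨k0, d0⟩ := kd
    simp only [List.map_cons, List.nodup_cons] at hnd
    obtain ⟨hk0, hrest⟩ := hnd
    simp only [List.foldl_cons]
    by_cases h : 0 ≤ k0 ∧ k0 < (n : Int)
    · have hjn : k0.toNat < n := by omega
      rw [if_pos h, PySem.List.getD_map_range g n k0.toNat PySem.Dict.empty hjn,
          pv_set_map_range g n k0.toNat,
          ih hrest (fun i => if i = k0.toNat then pvDictUpdate (g k0.toNat) d0 else g i)]
      apply List.map_congr_left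
      intro i hi
      have hi' : i < n := List.mem_range.mp hi
      by_cases hik : ((i : Nat) : Int) = k0
      · have hieq : i = k0.toNat := by omega
        have hlk : List.lookup ((i : Nat) : Int) rest = none := by
          rw [List.lookup_eq_none_iff]
          intro p hp
          simp only [bne_iff_ne, ne_eq]
          intro hC
          exact hk0 (by rw [← hik, hC]; exact List.mem_map_of_mem hp)
        subst hieq
        rw [hik] at hlk ⊢
        simp [List.lookup, hlk]
      · have hne : i ≠ k0.toNat := by omega
        have hbeq : (((i : Nat) : Int) == k0) = false := by simp [hik]
        simp [List.lookup, hbeq, hne]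
    · rw [if_neg h, ih hrest g]
      apply List.map_congr_left
      intro i hi
      have hi' : i < n := List.mem_range.mp hi
      have hbeq : (((i : Nat) : Int) == k0) = false := by
        simp only [beq_eq_false_iff_ne, ne_eq]
        omega
      simp [List.lookup, hbeq]

-- scattering ALL outputs equals per-index gathering, for frames given as a map over range
lemma pv_scatter_all (outputs : List (List (Int × List (Int × Int))))
    (hpre : ∀ res ∈ outputs, (res.map Prod.fst).Nodup)
    (n : Nat) (g : Nat → PySem.Dict Int Int) :
    outputs.foldl
      (fun frames res =>
        res.foldl
          (fun frames kd =>
            if 0 ≤ kd.1 ∧ kd.1 < (n : Int) then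
              frames.set kd.1.toNat (pvDictUpdate (frames.getD kd.1.toNat PySem.Dict.empty) kd.2)
            else frames)
          frames)
      ((List.range n).map g)
    = (List.range n).map (fun (i : Nat) =>
        outputs.foldl
          (fun out res =>
            match List.lookup ((i : Nat) : Int) res with
            | some d => pvDictUpdate out d
            | none => out)
          (g i)) := by
  induction outputs generalizing g with
  | nil => simp
  | cons res rest ih =>
    simp only [List.foldl_cons]
    rw [pv_scatter_one res (hpre res (List.mem_cons_self)) n g,
        ih (fun r hr => hpre r (List.mem_cons_of_mem _ hr))]

-- ===== VERDICT (by name: the statement is the Claim_ definition above) =====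
theorem track_gather_spec : Claim_equal_track_gather := by
  intro outputs img_ids _ hpre
  unfold Spec_track_gather track_gather track_gather_alt
  rw [PySem.List.foldl_append_singleton_eq_map
        (fun k => (outputs.foldl
            (fun out res =>
              match List.lookup k res with
              | some d => pvDictUpdate out d
              | none => out)
            PySem.Dict.empty).items),
      PySem.List.pyRange_zero_nat img_ids.length,
      show (List.replicate img_ids.length (PySem.Dict.empty : PySem.Dict Int Int))
          = (List.range img_ids.length).map (fun _ => PySem.Dict.empty) by
        simp [List.map_const'],
      pv_scatter_all outputs hpre img_ids.length (fun _ => PySem.Dict.empty)]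
  simp [List.map_map, Function.comp]
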